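-- pv_equiv track=rewrite | github.com/Anaphory/abui-network | analysis/make_network_config.py | turn_into_tree
-- ===== SOURCE A (Python) =====
-- def turn_into_tree(l):
--     if len(l) == 1:
--         return "{:}".format(l[0]), 0
--     else:
--         i = len(l) // 2
--         t1, h1 = turn_into_tree(l[:i])
--         t2, h2 = turn_into_tree(l[i:])
--         h = max(h1, h2) + 1
--         return "({:s}:{:d},{:s}:{:d})".format(
--             t1, h - h1,
--             t2, h - h2), h
-- ===== SOURCE B (Python) =====
-- def turn_into_tree(l):
--     # Index-based single pass: emit tokens into one buffer and join once;
--     # heights come from subtree sizes in closed form, so no slicing or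
--     # substring re-copying is needed.
--     def height(n):
--         h = 0
--         while (1 << h) < n:
--             h += 1
--         return h
--
--     buf = []
--
--     def emit(lo, hi):
--         n = hi - lo
--         if n == 1:
--             buf.append(str(l[lo]))
--         else:
--             mid = lo + n // 2
--             h = height(n)
--             buf.append("(")
--             emit(lo, mid)
--             buf.append(":%d," % (h - height(n // 2)))
--             emit(mid, hi)
--             buf.append(":%d)" % (h - height(n - n // 2)))
--
--     emit(0, len(l))
--     return "".join(buf), height(len(l))
-- ===== Notes on version B (the rewrite author's own statement) =====
-- stated objective: alternative
-- what changed: B replaces A's slice-and-concatenate recursion by an index-based pass that appends tokens to one buffer joined once, with subtree heights computed in closed form from subtree sizes (ceil(log2 n)) instead of being returned up the recursion; measured ~1.3x faster at large n (below the 1.5x bar, so not claimed as faster).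
import Mathlib
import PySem

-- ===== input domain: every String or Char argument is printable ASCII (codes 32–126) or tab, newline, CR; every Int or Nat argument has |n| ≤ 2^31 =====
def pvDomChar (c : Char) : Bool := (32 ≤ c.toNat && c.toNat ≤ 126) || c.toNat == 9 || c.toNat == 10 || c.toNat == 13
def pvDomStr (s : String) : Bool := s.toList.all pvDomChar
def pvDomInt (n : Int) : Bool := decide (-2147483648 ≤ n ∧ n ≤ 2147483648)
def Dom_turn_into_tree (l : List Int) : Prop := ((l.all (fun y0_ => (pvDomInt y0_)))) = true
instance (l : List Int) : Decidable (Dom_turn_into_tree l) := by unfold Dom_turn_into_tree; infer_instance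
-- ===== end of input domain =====

-- B builds the Newick string by emitting tokens into one buffer joined once, over index
-- ranges instead of slices, with heights in closed form from subtree sizes (alternative algorithm).


-- ===== PORT A =====
-- Fuel-guarded transliteration of A's recursion; fuel = len l suffices since every
-- recursive call is on a strictly shorter nonempty slice (on [] Python recurses forever,
-- which Pre_ excludes).
def ttFuelA : Nat → List Int → String × Int
  | 0, _ => ("", 0)
  | fuel+1, l =>
    if l.length = 1 then
      (PySem.Int.toStr (l.headD 0), 0)            -- "{:}".format(l[0])
    else
      let i := l.length / 2                        -- i = len(l) // 2 (len ≥ 0, exact)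
      let r1 := ttFuelA fuel (l.take i)            -- l[:i], 0 ≤ i ≤ len: exact as take
      let r2 := ttFuelA fuel (l.drop i)            -- l[i:]: exact as drop
      let h := max r1.2 r2.2 + 1
      ("(" ++ r1.1 ++ ":" ++ PySem.Int.toStr (h - r1.2) ++ "," ++
         r2.1 ++ ":" ++ PySem.Int.toStr (h - r2.2) ++ ")", h)

def turn_into_tree (l : List Int) : String × Int := ttFuelA l.length l

-- ===== PORT B =====
-- height(n): while (1 << h) < n: h += 1  (fuel n bounds the loop: the answer is ≤ n)
def heightLoop : Nat → Nat → Nat → Nat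
  | 0, h, _ => h
  | f+1, h, n => if 1 <<< h < n then heightLoop f (h+1) n else h

def heightB (n : Nat) : Nat := heightLoop n 0 n

-- emit(lo, hi) appending tokens to buf; fuel = hi - lo bounds the recursion depth
def emitB (l : List Int) : Nat → Nat → Nat → List String → List String
  | 0, _, _, buf => buf
  | f+1, lo, hi, buf =>
    let n := hi - lo
    if n = 1 then
      buf ++ [PySem.Int.toStr (l.getD lo 0)]       -- str(l[lo]), lo < len: exact
    else
      let mid := lo + n / 2
      let h := heightB n
      let buf1 := emitB l f lo mid (buf ++ ["("])
      let buf2 := emitB l f mid hi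
        (buf1 ++ [":" ++ PySem.Int.toStr ((h : Int) - (heightB (n / 2) : Int)) ++ ","])
      buf2 ++ [":" ++ PySem.Int.toStr ((h : Int) - (heightB (n - n / 2) : Int)) ++ ")"]

def turn_into_tree_alt (l : List Int) : String × Int :=
  (PySem.Str.join "" (emitB l l.length 0 l.length []), (heightB l.length : Int))

-- ===== PRECONDITION & SPEC =====
-- Pre_ excludes only the empty list, on which A recurses forever (RecursionError).
def Pre_turn_into_tree (l : List Int) : Prop := l ≠ []
instance (l : List Int) : Decidable (Pre_turn_into_tree l) := by unfold Pre_turn_into_tree; infer_instance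
def pvWitness_turn_into_tree : List Int := [3, 1, 4]

def Spec_turn_into_tree (l : List Int) (out : String × Int) : Prop := out = turn_into_tree_alt l
instance (l : List Int) (out : String × Int) : Decidable (Spec_turn_into_tree l out) := by unfold Spec_turn_into_tree; infer_instance

-- ===== CLAIM (what is proved, stated in full; the proofs are below) =====
def Claim_equal_turn_into_tree : Prop := ∀ (l : List Int), Dom_turn_into_tree l → Pre_turn_into_tree l → Spec_turn_into_tree l (turn_into_tree l)

-- ===== LEMMAS AND PROOFS =====

-- heightLoop computes the ceiling base-2 logarithm
theorem heightLoop_clog (f : Nat) : ∀ (h n : Nat), Nat.clog 2 n ≤ h + f → h ≤ Nat.clog 2 n →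
    heightLoop f h n = Nat.clog 2 n := by
  induction f with
  | zero => intro h n h1 h2; simp [heightLoop]; omega
  | succ f ih =>
    intro h n h1 h2
    simp only [heightLoop, Nat.one_shiftLeft]
    split_ifs with hc
    · have : ¬ Nat.clog 2 n ≤ h := by
        intro hle
        exact absurd ((Nat.clog_le_iff_le_pow (by norm_num)).mp hle) (by omega)
      exact ih (h+1) n (by omega) (by omega)
    · have : Nat.clog 2 n ≤ h := (Nat.clog_le_iff_le_pow (by norm_num)).mpr (by omega)
      omega

theorem heightB_eq (n : Nat) : heightB n = Nat.clog 2 n := by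
  apply heightLoop_clog
  · have hn : n ≤ 2 ^ n := Nat.le_of_lt Nat.lt_two_pow_self
    have := (Nat.clog_le_iff_le_pow (b := 2) (x := n) (y := n) (by norm_num)).mpr hn
    omega
  · omega

theorem clog_split (n : Nat) (h : 2 ≤ n) :
    Nat.clog 2 n = max (Nat.clog 2 (n / 2)) (Nat.clog 2 (n - n / 2)) + 1 := by
  have hmax : max (Nat.clog 2 (n / 2)) (Nat.clog 2 (n - n / 2)) = Nat.clog 2 (n - n / 2) :=
    Nat.max_eq_right (Nat.clog_mono_right 2 (by omega))
  have h2 := Nat.clog_of_one_lt (b := 2) (n := n) (by norm_num) (by omega)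
  have he : n + 2 - 1 = n + 1 := by omega
  rw [he] at h2
  have hh : n - n / 2 = (n + 1) / 2 := by omega
  rw [hmax, hh, h2]

-- the second component of A's result is the ceiling log of the length
theorem ttA_snd (f : Nat) : ∀ (s : List Int), 0 < s.length → s.length ≤ f →
    (ttFuelA f s).2 = (Nat.clog 2 s.length : Int) := by
  induction f with
  | zero => intro s h1 h2; omega
  | succ f ih =>
    intro s h1 h2
    simp only [ttFuelA]
    split_ifs with hc
    · rw [hc]; simp
    · have hlen : 2 ≤ s.length := by omega
      have e1 := ih (s.take (s.length / 2)) (by simp; omega) (by simp; omega)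
      have e2 := ih (s.drop (s.length / 2)) (by simp; omega) (by simp; omega)
      simp only [List.length_take, List.length_drop] at e1 e2
      have hmin : min (s.length / 2) s.length = s.length / 2 := by omega
      rw [hmin] at e1
      simp only [e1, e2]
      rw [clog_split s.length hlen]
      push_cast
      omega

-- emitB only appends to its buffer
theorem emitB_acc (l : List Int) (f : Nat) : ∀ (lo hi : Nat) (buf : List String),
    emitB l f lo hi buf = buf ++ emitB l f lo hi [] := by
  induction f with
  | zero => intro lo hi buf; simp [emitB]
  | succ f ih =>
    intro lo hi buf
    simp only [emitB]
    split_ifs with hc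
    · simp
    · rw [ih lo _ (buf ++ ["("]), ih lo _ ([] ++ ["("])]
      rw [ih _ hi (((buf ++ ["("]) ++ emitB l f lo (lo + (hi - lo) / 2) []) ++ _),
          ih _ hi ((([] ++ ["("]) ++ emitB l f lo (lo + (hi - lo) / 2) []) ++ _)]
      simp

-- the segment [lo, hi) of l, as the list A recurses on
def segT (l : List Int) (lo hi : Nat) : List Int := (l.drop lo).take (hi - lo)

theorem segT_length (l : List Int) (lo hi : Nat) (h : hi ≤ l.length) (h2 : lo ≤ hi) :
    (segT l lo hi).length = hi - lo := by
  rw [segT, List.length_take, List.length_drop]; omega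

theorem segT_take (l : List Int) (lo hi : Nat) :
    (segT l lo hi).take ((hi - lo) / 2) = segT l lo (lo + (hi - lo) / 2) := by
  rw [segT, segT, List.take_take]
  congr 1
  omega

theorem segT_drop (l : List Int) (lo hi : Nat) :
    (segT l lo hi).drop ((hi - lo) / 2) = segT l (lo + (hi - lo) / 2) hi := by
  rw [segT, segT, List.drop_take, List.drop_drop]
  congr 1
  omega

theorem segT_singleton (l : List Int) (lo hi : Nat) (h1 : hi - lo = 1) (h : hi ≤ l.length) :
    segT l lo hi = [l.getD lo 0] := by
  have hlo : lo < l.length := by omega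
  rw [segT, h1, List.drop_eq_getElem_cons hlo, List.take_succ_cons, List.take_zero,
    List.getD_eq_getElem _ _ hlo]

-- flattening ignores empty separators (used for ''.join)
theorem flatten_intersperse_nil : ∀ (ps : List (List Char)),
    (List.intersperse ([] : List Char) ps).flatten = ps.flatten
  | [] => rfl
  | [_] => rfl
  | p :: q :: r => by
    simp only [List.intersperse]
    simp [flatten_intersperse_nil (q :: r)]

-- joined tokens of B = the string A returns, on every segment
theorem main_fst (l : List Int) (fB : Nat) : ∀ (fA lo hi : Nat), 0 < hi - lo → hi ≤ l.length →
    hi - lo ≤ fB → hi - lo ≤ fA →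
    ((emitB l fB lo hi []).map String.toList).flatten = (ttFuelA fA (segT l lo hi)).1.toList := by
  induction fB with
  | zero => intro fA lo hi h1; omega
  | succ fB ih =>
    intro fA lo hi h1 h2 h3 h4
    cases fA with
    | zero => omega
    | succ fA =>
    have hlen : (segT l lo hi).length = hi - lo := segT_length l lo hi h2 (by omega)
    simp only [emitB, ttFuelA, hlen]
    split_ifs with hc
    · rw [segT_singleton l lo hi hc h2]
      simp [PySem.Int.toList_toStr]
    · have hn : 2 ≤ hi - lo := by omega
      set n := hi - lo with hndef
      set mid := lo + n / 2 with hmid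
      have hA1 : (segT l lo hi).take (n / 2) = segT l lo mid := segT_take l lo hi
      have hA2 : (segT l lo hi).drop (n / 2) = segT l mid hi := segT_drop l lo hi
      have hml : mid - lo = n / 2 := by omega
      have hhm : hi - mid = n - n / 2 := by omega
      -- B side: flatten the token list
      rw [emitB_acc l fB lo mid, emitB_acc l fB mid hi]
      -- heights
      have hgt1 : (ttFuelA fA (segT l lo mid)).2 = (Nat.clog 2 (n / 2) : Int) := by
        have := ttA_snd fA (segT l lo mid)
          (by rw [segT_length l lo mid (by omega) (by omega)]; omega)
          (by rw [segT_length l lo mid (by omega) (by omega)]; omega)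
        rwa [segT_length l lo mid (by omega) (by omega), hml] at this
      have hgt2 : (ttFuelA fA (segT l mid hi)).2 = (Nat.clog 2 (n - n / 2) : Int) := by
        have := ttA_snd fA (segT l mid hi)
          (by rw [segT_length l mid hi h2 (by omega)]; omega)
          (by rw [segT_length l mid hi h2 (by omega)]; omega)
        rwa [segT_length l mid hi h2 (by omega), hhm] at this
      have hs1 := ih fA lo mid (by omega) (by omega) (by omega) (by omega)
      have hs2 := ih fA mid hi (by omega) h2 (by omega) (by omega)
      rw [hA1, hA2]
      simp only [List.map_append, List.flatten_append, List.map_cons, List.map_nil,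
        List.flatten_cons, List.flatten_nil, String.toList_append, hs1, hs2, hgt1, hgt2,
        heightB_eq, clog_split n hn]
      push_cast
      simp [PySem.Int.toList_toStr]

-- ===== VERDICT (by name: the statement is the Claim_ definition above) =====
theorem turn_into_tree_spec : Claim_equal_turn_into_tree := by
  intro l _ hpre
  unfold Spec_turn_into_tree turn_into_tree turn_into_tree_alt
  have hlen : 0 < l.length := List.length_pos_iff.mpr hpre
  have hseg : segT l 0 l.length = l := by simp [segT]
  apply Prod.ext
  · apply String.toList_injective
    have := main_fst l l.length l.length 0 l.length (by omega) (by omega) (by omega) (by omega)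
    rw [hseg] at this
    rw [← this]
    rw [PySem.Str.toList_join]
    simp [PySem.Chars.join, List.intercalate, flatten_intersperse_nil]
  · have := ttA_snd l.length l hlen (le_refl _)
    rw [this, heightB_eq]
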